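-- pv_equiv track=rewrite | github.com/bog287/AI_bog287 | lab1_pb3.py | produs_rar
-- ===== SOURCE A (Python) =====
-- def produs_rar(l1, l2):
--     # complexitate: O(n)
--     s = 0
--     e1 = 0
--     while e1 < len(l1):
--         if l1[e1] == 0 or l2[e1] == 0:
--             l1.pop(e1)
--             l2.pop(e1)
--             e1 -= 1
--             if e1 == -1:
--                 e1 += 1
--         else:
--             e1 += 1
--
--     for e1, e2 in zip(l1, l2):
--         s += e1 * e2
--     return s
-- ===== SOURCE B (Python) =====
-- def produs_rar(l1, l2):
--     # Sparse dot product: skip any index where either entry is zero.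
--     return sum(x * y for x, y in zip(l1, l2) if x != 0 and y != 0)
-- ===== Notes on version B (the rewrite author's own statement) =====
-- stated objective: simpler
-- what changed: Replaces the in-place while-loop that pops zero-containing pairs (with its index-stepping bookkeeping) by a single pure pass: sum x*y over the zipped pairs where both entries are nonzero; B does not mutate its arguments, the equivalence is about the return value. Pre_ excludes only inputs where len(l1) > len(l2), on which A raises IndexError.
import Mathlib
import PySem

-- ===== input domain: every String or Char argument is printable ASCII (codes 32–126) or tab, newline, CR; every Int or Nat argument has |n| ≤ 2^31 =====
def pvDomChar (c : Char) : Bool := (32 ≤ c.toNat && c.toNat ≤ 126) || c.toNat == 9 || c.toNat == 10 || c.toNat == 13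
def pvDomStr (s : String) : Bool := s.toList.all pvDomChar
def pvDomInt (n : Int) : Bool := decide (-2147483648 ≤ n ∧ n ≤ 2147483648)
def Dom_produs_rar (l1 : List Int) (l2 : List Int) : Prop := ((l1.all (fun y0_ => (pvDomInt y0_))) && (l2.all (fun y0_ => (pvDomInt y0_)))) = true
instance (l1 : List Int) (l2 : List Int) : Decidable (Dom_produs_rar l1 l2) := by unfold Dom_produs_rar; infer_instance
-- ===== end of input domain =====

-- B replaces A's index-juggling pop-loop by one pure filtering pass over the zipped pairs;
-- the equivalence proved is about the RETURN value only (A prunes l1/l2 in place; B does not mutate).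

-- ===== PORT A =====
-- the while-loop: state (l1, l2, e1); Python's `e1 -= 1; if e1 == -1: e1 += 1` is Nat truncated subtraction
def produsRarLoopA (l1 : List Int) (l2 : List Int) (e1 : Nat) : List Int × List Int :=
  if h : e1 < l1.length then
    match PySem.List.pyGet? l2 (e1 : Int) with
    | none => (l1, l2)  -- Python raises IndexError here (l2 shorter than l1); excluded by Pre_
    | some y =>
      if l1[e1] = 0 ∨ y = 0 then
        produsRarLoopA (l1.eraseIdx e1) (l2.eraseIdx e1) (e1 - 1)
      else
        produsRarLoopA l1 l2 (e1 + 1)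
  else (l1, l2)
termination_by 2 * l1.length - e1
decreasing_by
  · simp only [List.length_eraseIdx, h, if_pos]; omega
  · omega

def produs_rar (l1 : List Int) (l2 : List Int) : Int :=
  let p := produsRarLoopA l1 l2 0
  (p.1.zip p.2).foldl (fun s q => s + q.1 * q.2) 0

-- ===== PORT B =====
def produs_rar_alt (l1 : List Int) (l2 : List Int) : Int :=
  (((l1.zip l2).filter (fun q => q.1 != 0 && q.2 != 0)).map (fun q => q.1 * q.2)).sum

-- ===== PRECONDITION & SPEC =====
-- A raises IndexError whenever len(l1) > len(l2); Pre_ excludes exactly those inputs.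
def Pre_produs_rar (l1 : List Int) (l2 : List Int) : Prop := l1.length ≤ l2.length
instance (l1 : List Int) (l2 : List Int) : Decidable (Pre_produs_rar l1 l2) := by unfold Pre_produs_rar; infer_instance
def pvWitness_produs_rar : List Int × List Int := ([1, 0, 2], [3, 4, 5])

def Spec_produs_rar (l1 : List Int) (l2 : List Int) (out : Int) : Prop := out = produs_rar_alt l1 l2
instance (l1 : List Int) (l2 : List Int) (out : Int) : Decidable (Spec_produs_rar l1 l2 out) := by unfold Spec_produs_rar; infer_instance

-- ===== CLAIM (what is proved, stated in full; the proofs are below) =====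
def Claim_equal_produs_rar : Prop := ∀ (l1 : List Int) (l2 : List Int), Dom_produs_rar l1 l2 → Pre_produs_rar l1 l2 → Spec_produs_rar l1 l2 (produs_rar l1 l2)

-- ===== LEMMAS AND PROOFS =====

theorem foldl_dot (l : List (Int × Int)) (s : Int) :
    l.foldl (fun s q => s + q.1 * q.2) s = s + (l.map (fun q => q.1 * q.2)).sum := by
  induction l generalizing s with
  | nil => simp
  | cons p t ih => simp [List.foldl_cons, ih]; ring

theorem zip_eraseIdx (l1 l2 : List Int) (i : Nat) (h : i < l1.length) (hle : l1.length ≤ l2.length) :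
    (l1.eraseIdx i).zip (l2.eraseIdx i) = (l1.zip l2).eraseIdx i := by
  induction l1 generalizing l2 i with
  | nil => simp at h
  | cons a t ih =>
    cases l2 with
    | nil => simp at hle
    | cons b u =>
      cases i with
      | zero => simp
      | succ j =>
        simp only [List.eraseIdx_cons_succ, List.zip_cons_cons]
        rw [ih u j (by simpa using h) (by simpa using hle)]

theorem sum_map_eraseIdx_of_zero (l : List (Int × Int)) (i : Nat) (h : i < l.length)
    (hz : l[i].1 * l[i].2 = 0) :
    ((l.eraseIdx i).map (fun q => q.1 * q.2)).sum = (l.map (fun q => q.1 * q.2)).sum := by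
  induction l generalizing i with
  | nil => simp at h
  | cons p t ih =>
    cases i with
    | zero =>
      simp only [List.getElem_cons_zero] at hz
      simp [hz]
    | succ j =>
      simp only [List.eraseIdx_cons_succ, List.map_cons, List.sum_cons]
      rw [ih j (by simpa using h) (by simpa using hz)]

theorem loopA_sum (l1 l2 : List Int) (e1 : Nat) :
    l1.length ≤ l2.length →
    (((produsRarLoopA l1 l2 e1).1.zip (produsRarLoopA l1 l2 e1).2).map (fun q => q.1 * q.2)).sum
      = ((l1.zip l2).map (fun q => q.1 * q.2)).sum := by
  fun_induction produsRarLoopA l1 l2 e1 with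
  | case1 l1 l2 e1 h heq =>
    intro hle
    simp only [PySem.List.pyGet?_natCast, List.getElem?_eq_none_iff] at heq
    omega
  | case2 l1 l2 e1 h y heq hz ih =>
    intro hle
    have a1 : (l1.eraseIdx e1).length = l1.length - 1 := by
      simp [List.length_eraseIdx, h]
    have a2 : (l2.eraseIdx e1).length = l2.length - 1 := by
      simp [List.length_eraseIdx, Nat.lt_of_lt_of_le h hle]
    have hlen : (l1.eraseIdx e1).length ≤ (l2.eraseIdx e1).length := by omega
    rw [ih hlen, zip_eraseIdx l1 l2 e1 h hle]
    have hget : y = l2[e1]'(by omega) := by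
      simp only [PySem.List.pyGet?_natCast] at heq
      rw [List.getElem?_eq_getElem (by omega)] at heq
      exact (Option.some.inj heq).symm
    have hi : e1 < (l1.zip l2).length := by simp [List.length_zip]; omega
    apply sum_map_eraseIdx_of_zero _ _ hi
    have : (l1.zip l2)[e1] = (l1[e1], l2[e1]'(by omega)) := by
      simp [List.getElem_zip]
    rw [this]
    rcases hz with hz | hz
    · simp [hz]
    · rw [hget] at hz; simp [hz]
  | case3 l1 l2 e1 h y heq hz ih => intro hle; exact ih hle
  | case4 l1 l2 e1 h => intro _; rfl

theorem sum_map_filter_nonzero (l : List (Int × Int)) :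
    ((l.filter (fun q => q.1 != 0 && q.2 != 0)).map (fun q => q.1 * q.2)).sum
      = (l.map (fun q => q.1 * q.2)).sum := by
  induction l with
  | nil => rfl
  | cons p t ih =>
    by_cases h1 : p.1 = 0
    · simp [h1, ih]
    · by_cases h2 : p.2 = 0
      · simp [h2, ih]
      · simp [h1, h2, ih]

-- ===== VERDICT (by name: the statement is the Claim_ definition above) =====
theorem produs_rar_spec : Claim_equal_produs_rar := by
  intro l1 l2 _ hpre
  unfold Spec_produs_rar produs_rar produs_rar_alt
  rw [foldl_dot, loopA_sum l1 l2 0 hpre, sum_map_filter_nonzero, Int.zero_add]
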